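-- pv_equiv track=rewrite | github.com/jerschneider/C200-Assignments | Assignment3/whiling.py | minValTuple
-- ===== SOURCE A (Python) =====
-- def minValTuple(theLst):
--     i = 0
--     minVal = theLst[0]
--     while i < len(theLst):
--         if theLst[i] <= minVal:
--             minVal = theLst[i]
--             minValIndex = i
--         i = i + 1
--         tup1 = (minVal, minValIndex)
--         MinValTuple = tup1
--     return MinValTuple
--
--
--
--     """
--     Given a list, determine the minimum value and index in the list
--
--     Input: A list numbers of any length (at least 1 item in the list)
--
--     Return: Tuple, first item is the smallest value, second item is the index of the value (the last occurence)
--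
--     Limitation: The only function you can use (if you want to) is `len()` and `range()`. Cannot use "in" besides "for var in container"
--     """
-- ===== SOURCE B (Python) =====
-- def minValTuple(theLst):
--     minVal = min(theLst)
--     minValIndex = len(theLst) - 1 - theLst[::-1].index(minVal)
--     return (minVal, minValIndex)
-- ===== Notes on version B (the rewrite author's own statement) =====
-- stated objective: simpler
-- what changed: Replaces the single index-tracking while loop by min() to get the value and a reversed-list index() search to get the last occurrence index.
-- outside the precondition, e.g. on minValTuple([]): A raises IndexError, B raises ValueError
import Mathlib
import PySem

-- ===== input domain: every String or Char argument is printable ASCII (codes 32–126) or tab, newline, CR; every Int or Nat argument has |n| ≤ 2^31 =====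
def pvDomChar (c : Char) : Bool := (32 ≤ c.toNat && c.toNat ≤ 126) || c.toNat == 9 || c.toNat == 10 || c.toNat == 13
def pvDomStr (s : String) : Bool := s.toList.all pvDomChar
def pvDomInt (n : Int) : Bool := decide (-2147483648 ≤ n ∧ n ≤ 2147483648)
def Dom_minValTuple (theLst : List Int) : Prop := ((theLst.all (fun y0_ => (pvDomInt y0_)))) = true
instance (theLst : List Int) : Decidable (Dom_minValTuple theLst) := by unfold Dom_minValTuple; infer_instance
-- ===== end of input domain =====

-- B computes min() then locates the last occurrence via a reversed-list index() search,
-- instead of A's single index-tracking while loop (objective: simpler).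
-- Pre_ excludes the empty list, on which A raises IndexError (and B raises ValueError).


-- ===== PORT A =====
-- loop body: if theLst[i] <= minVal: minVal, minValIndex = theLst[i], i
def pvBody (l : List Int) (st : Int × Int) (i : Int) : Int × Int :=
  let v := PySem.List.pyGetD l i 0  -- i always in range here; default unused
  if v ≤ st.1 then (v, i) else st

-- while i < len(theLst): … ; i += 1  ported as a foldl of pvBody over pyRange 0 len 1,
-- state (minVal, minValIndex).  Python's minValIndex starts unassigned; iteration i = 0
-- always assigns it (theLst[0] <= theLst[0]), so the initial index 0 is never observed.
def minValTuple (theLst : List Int) : Int × Int :=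
  match theLst with
  | [] => (0, 0)  -- theLst[0] raises IndexError; excluded by Pre_
  | h :: _ =>
    (PySem.List.pyRange 0 (theLst.length : Int) 1).foldl (pvBody theLst) (h, 0)

-- ===== PORT B =====
-- theLst[::-1] is theLst.reverse (PySem.List.slice?_none_none_neg_one);
-- minVal is an element of theLst, so .index always finds it (getD default unused).
def minValTuple_alt (theLst : List Int) : Int × Int :=
  match theLst with
  | [] => (0, 0)  -- min([]) raises ValueError; excluded by Pre_
  | _ =>
    let minVal := (PySem.List.min? theLst (fun x => x)).getD 0
    let minValIndex : Int :=
      (theLst.length : Int) - 1 -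
        ((PySem.List.index? theLst.reverse minVal).getD 0 : Int)
    (minVal, minValIndex)

-- ===== PRECONDITION & SPEC =====
-- Pre_ excludes exactly the empty list, on which A raises IndexError.
def Pre_minValTuple (theLst : List Int) : Prop := theLst ≠ []
instance (theLst : List Int) : Decidable (Pre_minValTuple theLst) := by
  unfold Pre_minValTuple; infer_instance
def pvWitness_minValTuple : List Int := [3, 1, 1, 2]

def Spec_minValTuple (theLst : List Int) (out : Int × Int) : Prop := out = minValTuple_alt theLst
instance (theLst : List Int) (out : Int × Int) : Decidable (Spec_minValTuple theLst out) := by unfold Spec_minValTuple; infer_instance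

-- ===== CLAIM (what is proved, stated in full; the proofs are below) =====
def Claim_equal_minValTuple : Prop := ∀ (theLst : List Int), Dom_minValTuple theLst → Pre_minValTuple theLst → Spec_minValTuple theLst (minValTuple theLst)

-- ===== LEMMAS AND PROOFS =====

theorem pv_key (y : Int) (t : List Int) :
    minValTuple (y :: t) = minValTuple_alt (y :: t) := by
  induction t using List.reverseRecOn with
  | nil =>
      have hr : PySem.List.pyRange 0 (1 : Int) 1 = [(0 : Int)] := by
        simpa using PySem.List.pyRange_one_singleton 0
      simp [minValTuple, minValTuple_alt, hr, pvBody, PySem.List.pyGetD_zero_cons,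
        PySem.List.min?_id_cons]
  | append_singleton t' a ih =>
      simp only [minValTuple, minValTuple_alt] at ih ⊢
      have hlen : (((y :: (t' ++ [a]))).length : Int) = ((y :: t').length : Int) + 1 := by
        push_cast [List.length_cons, List.length_append, List.length_nil,
          List.length_singleton]
        ring
      rw [hlen, PySem.List.pyRange_one_succ_right (by exact_mod_cast Nat.zero_le _),
        List.foldl_append]
      -- the first len (y :: t') iterations never read the appended element
      have hbody :
          List.foldl (pvBody (y :: (t' ++ [a]))) ((y : Int), (0 : Int))
              (PySem.List.pyRange 0 ((y :: t').length : Int) 1)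
            = List.foldl (pvBody (y :: t')) ((y : Int), (0 : Int))
              (PySem.List.pyRange 0 ((y :: t').length : Int) 1) := by
        apply PySem.List.foldl_congr_mem
        intro acc i hi
        obtain ⟨h0, h1⟩ := PySem.List.mem_pyRange_one.mp hi
        have h1' : i < ((y :: (t' ++ [a])).length : Int) := by
          simp only [List.length_cons, List.length_append] at h1 ⊢
          omega
        have hlt : i.toNat < (y :: t').length := by
          simp only [List.length_cons] at h1 ⊢
          omega
        have hget : PySem.List.pyGetD (y :: (t' ++ [a])) i 0
            = PySem.List.pyGetD (y :: t') i 0 := by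
          rw [PySem.List.pyGetD_eq_getElem _ 0 h0 h1', PySem.List.pyGetD_eq_getElem _ 0 h0 h1]
          exact List.getElem_append_left (bs := [a]) hlt
        unfold pvBody
        rw [hget]
      rw [hbody, ih]
      -- the remaining iteration reads the appended element a
      have hgeta : PySem.List.pyGetD (y :: (t' ++ [a])) ((y :: t').length : Int) 0 = a := by
        rw [show y :: (t' ++ [a]) = (y :: t') ++ [a] from rfl, PySem.List.pyGetD_natCast]
        simp [List.getD_eq_getElem?_getD]
      simp only [List.foldl_cons, List.foldl_nil, pvBody, hgeta]
      have hm : (PySem.List.min? (y :: t') (fun x => x)).getD 0 = List.foldl min y t' := by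
        rw [PySem.List.min?_id_cons]
        rfl
      have hm' : (PySem.List.min? (y :: (t' ++ [a])) (fun x => x)).getD 0
          = min (List.foldl min y t') a := by
        rw [PySem.List.min?_id_cons]
        simp [List.foldl_append]
      have hrev : (y :: (t' ++ [a])).reverse = a :: (y :: t').reverse := by
        rw [show y :: (t' ++ [a]) = (y :: t') ++ [a] from rfl]
        simp
      rw [hm', hrev, hm]
      rcases le_or_gt a (List.foldl min y t') with hle | hlt
      · rw [if_pos hle, min_eq_right hle, PySem.List.index?_cons_self]
        simp only [Option.getD_some, Nat.cast_zero, Prod.mk.injEq]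
        exact ⟨trivial, by omega⟩
      · rw [if_neg (not_le.mpr hlt), min_eq_left hlt.le]
        have hne : a ≠ List.foldl min y t' := ne_of_gt hlt
        have hmin : PySem.List.min? (y :: t') (fun x => x)
            = some (List.foldl min y t') := PySem.List.min?_id_cons y t'
        have hmem : List.foldl min y t' ∈ (y :: t').reverse :=
          List.mem_reverse.mpr (PySem.List.min?_mem hmin)
        obtain ⟨r, hr⟩ := Option.isSome_iff_exists.mp
          ((PySem.List.index?_isSome_iff _ _).mpr hmem)
        rw [PySem.List.index?_cons_of_ne _ hne, hr]
        simp only [Option.map_some, Option.getD_some, Prod.mk.injEq]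
        exact ⟨trivial, by omega⟩

theorem minValTuple_eq_alt (theLst : List Int) (h : theLst ≠ []) :
    minValTuple theLst = minValTuple_alt theLst := by
  cases theLst with
  | nil => exact absurd rfl h
  | cons y t => exact pv_key y t

-- ===== VERDICT (by name: the statement is the Claim_ definition above) =====
theorem minValTuple_spec : Claim_equal_minValTuple := by
  intro l _ hpre
  unfold Spec_minValTuple
  exact minValTuple_eq_alt l hpre
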